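-- pv_equiv track=rewrite | github.com/Mironika12/aois | lab2/logic/minimization_carno.py | get_all_groups
-- ===== SOURCE A (Python) =====
-- def is_valid_group(kmap, cells, target):
--     return all(kmap[i][j] == target for i, j in cells)
--
-- def get_all_groups(kmap, target):
--     rows = len(kmap)
--     cols = len(kmap[0])
--
--     groups = []
--
--     for h in [1, 2, rows]:
--         for w in [1, 2, cols]:
--             if h * w == 0:
--                 continue
--
--             for i in range(rows):
--                 for j in range(cols):
--
--                     cells = []
--                     for di in range(h):
--                         for dj in range(w):
--                             ni = (i + di) % rows
--                             nj = (j + dj) % cols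
--                             cells.append((ni, nj))
--
--                     if is_valid_group(kmap, cells, target):
--                         groups.append(cells)
--
--     return groups
-- ===== SOURCE B (Python) =====
-- def get_all_groups(kmap, target):
--     rows = len(kmap)
--     cols = len(kmap[0])
--
--     # 2D prefix sums over the map tiled twice in each direction, so any
--     # wrapped h x w rectangle (h <= rows, w <= 2*cols) is a plain rectangle.
--     P = [[0] * (2 * cols + 1)]
--     for a in range(2 * rows):
--         prev = P[a]
--         row = [0]
--         s = 0
--         for b in range(2 * cols):
--             s += 1 if kmap[a % rows][b % cols] == target else 0
--             row.append(prev[b + 1] + s)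
--         P.append(row)
--
--     groups = []
--     for h in [1, 2, rows]:
--         for w in [1, 2, cols]:
--             if w == 0:
--                 continue
--             for i in range(rows):
--                 for j in range(cols):
--                     if P[i + h][j + w] - P[i][j + w] - P[i + h][j] + P[i][j] == h * w:
--                         groups.append([((i + di) % rows, (j + dj) % cols)
--                                        for di in range(h) for dj in range(w)])
--     return groups
-- ===== Notes on version B (the rewrite author's own statement) =====
-- stated objective: faster
-- what changed: B replaces A's per-group cell-by-cell validity scan with a 2D prefix-sum table over the doubly-tiled map, so each candidate rectangle is validated in O(1) and cells are materialised only for valid groups.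
import Mathlib
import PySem

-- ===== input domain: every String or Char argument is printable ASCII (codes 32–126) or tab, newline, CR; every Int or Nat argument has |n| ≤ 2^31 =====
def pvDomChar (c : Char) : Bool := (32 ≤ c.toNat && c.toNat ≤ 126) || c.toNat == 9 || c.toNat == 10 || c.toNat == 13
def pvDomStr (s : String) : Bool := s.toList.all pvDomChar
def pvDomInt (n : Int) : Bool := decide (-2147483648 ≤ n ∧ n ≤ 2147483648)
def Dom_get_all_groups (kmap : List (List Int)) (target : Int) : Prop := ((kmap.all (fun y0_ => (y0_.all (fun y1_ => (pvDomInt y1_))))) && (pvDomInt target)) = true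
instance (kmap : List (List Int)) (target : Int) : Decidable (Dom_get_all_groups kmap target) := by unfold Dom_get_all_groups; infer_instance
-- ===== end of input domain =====

-- B is a prefix-sum re-implementation of A; equality of return values is proved on Pre_ (non-empty, no short rows).

-- ===== PORT A =====
def is_valid_group (kmap : List (List Int)) (cells : List (Int × Int)) (target : Int) : Bool :=
  -- all(kmap[i][j] == target for i, j in cells); Python raises on a bad index, Pre_ keeps indices in range
  cells.all (fun c => ((PySem.List.pyGet? kmap c.1).bind (fun r => PySem.List.pyGet? r c.2)) == some target)

def get_all_groups (kmap : List (List Int)) (target : Int) : List (List (Int × Int)) :=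
  let rows : Int := (kmap.length : Int)
  let cols : Int := ((PySem.List.pyGetD kmap 0 []).length : Int)   -- kmap[0]; raises on empty kmap, excluded by Pre_
  ([(1 : Int), 2, rows]).foldl (fun groups h =>
    ([(1 : Int), 2, cols]).foldl (fun groups w =>
      if h * w == 0 then groups else
      (PySem.List.pyRange 0 rows 1).foldl (fun groups i =>
        (PySem.List.pyRange 0 cols 1).foldl (fun groups j =>
          let cells := (PySem.List.pyRange 0 h 1).foldl (fun cells di =>
            (PySem.List.pyRange 0 w 1).foldl (fun cells dj =>
              cells ++ [(PySem.Int.mod (i + di) rows, PySem.Int.mod (j + dj) cols)]) cells) []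
          if is_valid_group kmap cells target then groups ++ [cells] else groups) groups) groups) groups) []

-- ===== PORT B =====
def get_all_groups_alt (kmap : List (List Int)) (target : Int) : List (List (Int × Int)) :=
  let rows : Int := (kmap.length : Int)
  let cols : Int := ((PySem.List.pyGetD kmap 0 []).length : Int)
  -- prefix-sum table over the doubly tiled map
  let P : List (List Int) :=
    (PySem.List.pyRange 0 (2 * rows) 1).foldl (fun P a =>
      let prev := PySem.List.pyGetD P a []
      let rs := (PySem.List.pyRange 0 (2 * cols) 1).foldl (fun (rs : List Int × Int) b =>
        let s := rs.2 + (if (PySem.List.pyGetD (PySem.List.pyGetD kmap (PySem.Int.mod a rows) []) (PySem.Int.mod b cols) 0) == target then 1 else 0)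
        (rs.1 ++ [PySem.List.pyGetD prev (b + 1) 0 + s], s)) ([0], 0)
      P ++ [rs.1]) [List.replicate (2 * cols + 1).toNat (0 : Int)]
  ([(1 : Int), 2, rows]).foldl (fun groups h =>
    ([(1 : Int), 2, cols]).foldl (fun groups w =>
      if w == 0 then groups else
      (PySem.List.pyRange 0 rows 1).foldl (fun groups i =>
        (PySem.List.pyRange 0 cols 1).foldl (fun groups j =>
          if PySem.List.pyGetD (PySem.List.pyGetD P (i + h) []) (j + w) 0
             - PySem.List.pyGetD (PySem.List.pyGetD P i []) (j + w) 0
             - PySem.List.pyGetD (PySem.List.pyGetD P (i + h) []) j 0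
             + PySem.List.pyGetD (PySem.List.pyGetD P i []) j 0 == h * w then
            groups ++ [(PySem.List.pyRange 0 h 1).flatMap (fun di =>
              (PySem.List.pyRange 0 w 1).map (fun dj =>
                (PySem.Int.mod (i + di) rows, PySem.Int.mod (j + dj) cols)))]
          else groups) groups) groups) groups) []

-- ===== PRECONDITION & SPEC =====
-- Pre_ excludes exactly the inputs where Python A raises IndexError: the empty map (kmap[0]) and
-- maps whose later rows are shorter than the first row (kmap[ni][nj] with nj < len(kmap[0])).
def Pre_get_all_groups (kmap : List (List Int)) (target : Int) : Prop :=
  kmap ≠ [] ∧ ∀ row ∈ kmap, (kmap.headD []).length ≤ row.length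
instance (kmap : List (List Int)) (target : Int) : Decidable (Pre_get_all_groups kmap target) := by
  unfold Pre_get_all_groups; infer_instance
def pvWitness_get_all_groups : List (List Int) × Int := ([[1, 0], [0, 1]], 1)

def Spec_get_all_groups (kmap : List (List Int)) (target : Int) (out : List (List (Int × Int))) : Prop := out = get_all_groups_alt kmap target
instance (kmap : List (List Int)) (target : Int) (out : List (List (Int × Int))) : Decidable (Spec_get_all_groups kmap target out) := by unfold Spec_get_all_groups; infer_instance

-- ===== CLAIM (what is proved, stated in full; the proofs are below) =====
def Claim_equal_get_all_groups : Prop := ∀ (kmap : List (List Int)) (target : Int), Dom_get_all_groups kmap target → Pre_get_all_groups kmap target → Spec_get_all_groups kmap target (get_all_groups kmap target)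

-- ===== LEMMAS AND PROOFS =====

def pvCols (kmap : List (List Int)) : Nat := (kmap.headD []).length

def pvInd (kmap : List (List Int)) (target : Int) (x y : Nat) : Int :=
  if ((kmap.getD (x % kmap.length) []).getD (y % pvCols kmap) 0) == target then 1 else 0

def pvT (kmap : List (List Int)) (target : Int) (x b : Nat) : Int :=
  ∑ y ∈ Finset.range b, pvInd kmap target x y

def pvS (kmap : List (List Int)) (target : Int) (a b : Nat) : Int :=
  ∑ x ∈ Finset.range a, pvT kmap target x b

def pvRow (kmap : List (List Int)) (target : Int) (a : Nat) : List Int :=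
  (List.range (2 * pvCols kmap + 1)).map (pvS kmap target a)

theorem pvGetD_zero_len (kmap : List (List Int)) :
    ((PySem.List.pyGetD kmap 0 []).length : Int) = (pvCols kmap : Int) := by
  cases kmap <;> simp [PySem.List.pyGetD_zero, pvCols, List.getD]

theorem pvS_zero (kmap : List (List Int)) (target : Int) (a : Nat) : pvS kmap target a 0 = 0 := by
  simp [pvS, pvT]

theorem pvS_succ_row (kmap : List (List Int)) (target : Int) (a b : Nat) :
    pvS kmap target (a+1) b = pvS kmap target a b + pvT kmap target a b := by
  simp [pvS, Finset.sum_range_succ]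

-- inner row fold
theorem pvRowFold (kmap : List (List Int)) (target : Int) (aN m : Nat) (hm : m ≤ 2 * pvCols kmap) :
    (PySem.List.pyRange 0 (m : Int) 1).foldl
      (fun (rs : List Int × Int) b =>
        (rs.1 ++ [PySem.List.pyGetD (pvRow kmap target aN) (b + 1) 0 +
            (rs.2 + (if (PySem.List.pyGetD (PySem.List.pyGetD kmap (PySem.Int.mod (aN : Int) (kmap.length : Int)) []) (PySem.Int.mod b ((pvCols kmap : Nat) : Int)) 0) == target then 1 else 0))],
         rs.2 + (if (PySem.List.pyGetD (PySem.List.pyGetD kmap (PySem.Int.mod (aN : Int) (kmap.length : Int)) []) (PySem.Int.mod b ((pvCols kmap : Nat) : Int)) 0) == target then 1 else 0))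
      ) ([0], 0)
    = ((List.range (m+1)).map (pvS kmap target (aN+1)), pvT kmap target aN m) := by
  induction m with
  | zero =>
      simp [PySem.List.pyRange_one_eq_nil (by norm_num : (0:Int) ≤ 0), pvT, pvS_zero]
  | succ m ih =>
      have hm' : m ≤ 2 * pvCols kmap := by omega
      have hcast : ((m+1 : Nat) : Int) = (m : Int) + 1 := by push_cast; ring
      rw [hcast, PySem.List.pyRange_one_succ_right (by positivity), List.foldl_append, ih hm']
      simp only [List.foldl_cons, List.foldl_nil]
      have hmodr : PySem.Int.mod ((aN : Nat) : Int) ((kmap.length : Nat) : Int) = ((aN % kmap.length : Nat) : Int) :=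
        PySem.Int.mod_natCast aN kmap.length
      have hmodc : PySem.Int.mod ((m : Nat) : Int) ((pvCols kmap : Nat) : Int) = ((m % pvCols kmap : Nat) : Int) :=
        PySem.Int.mod_natCast m (pvCols kmap)
      have hprev : PySem.List.pyGetD (pvRow kmap target aN) ((m : Int) + 1) 0 = pvS kmap target aN (m+1) := by
        have : ((m : Int) + 1) = ((m+1 : Nat) : Int) := by push_cast; ring
        rw [this, PySem.List.pyGetD_natCast, pvRow]
        rw [List.getD_eq_getElem?_getD]
        simp [List.getElem?_map, List.getElem?_range, Nat.lt_succ_of_le hm]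
      have hind : (if (PySem.List.pyGetD (PySem.List.pyGetD kmap (PySem.Int.mod (aN : Int) (kmap.length : Int)) []) (PySem.Int.mod (m : Int) ((pvCols kmap : Nat) : Int)) 0) == target then (1:Int) else 0) = pvInd kmap target aN m := by
        rw [hmodr, hmodc, PySem.List.pyGetD_natCast, PySem.List.pyGetD_natCast, pvInd]
      rw [hprev, hind]
      have hT : pvT kmap target aN (m+1) = pvT kmap target aN m + pvInd kmap target aN m := by
        simp [pvT, Finset.sum_range_succ]
      have hS : pvS kmap target aN (m+1) + (pvT kmap target aN m + pvInd kmap target aN m)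
          = pvS kmap target (aN+1) (m+1) := by
        rw [pvS_succ_row, hT]
      rw [List.range_succ (n := m+1), List.map_append, hT, hS]
      simp

theorem pvRow_zero (kmap : List (List Int)) (target : Int) :
    pvRow kmap target 0 = List.replicate (2 * pvCols kmap + 1) 0 := by
  simp [pvRow, pvS, List.eq_replicate_iff]

theorem pvPFold (kmap : List (List Int)) (target : Int) (k : Nat) (hk : k ≤ 2 * kmap.length) :
    (PySem.List.pyRange 0 (k : Int) 1).foldl
      (fun (P : List (List Int)) a =>
        P ++ [((PySem.List.pyRange 0 ((2 * pvCols kmap : Nat) : Int) 1).foldl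
          (fun (rs : List Int × Int) b =>
            (rs.1 ++ [PySem.List.pyGetD (PySem.List.pyGetD P a []) (b + 1) 0 +
                (rs.2 + (if (PySem.List.pyGetD (PySem.List.pyGetD kmap (PySem.Int.mod a (kmap.length : Int)) []) (PySem.Int.mod b ((pvCols kmap : Nat) : Int)) 0) == target then 1 else 0))],
             rs.2 + (if (PySem.List.pyGetD (PySem.List.pyGetD kmap (PySem.Int.mod a (kmap.length : Int)) []) (PySem.Int.mod b ((pvCols kmap : Nat) : Int)) 0) == target then 1 else 0))
          ) ([0], 0)).1]) [List.replicate (2 * pvCols kmap + 1) 0]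
    = (List.range (k+1)).map (pvRow kmap target) := by
  induction k with
  | zero =>
      simp [PySem.List.pyRange_one_eq_nil (by norm_num : (0:Int) ≤ 0), pvRow_zero]
  | succ k ih =>
      have hk' : k ≤ 2 * kmap.length := by omega
      have hcast : ((k+1 : Nat) : Int) = (k : Int) + 1 := by push_cast; ring
      rw [hcast, PySem.List.pyRange_one_succ_right (by positivity), List.foldl_append, ih hk']
      simp only [List.foldl_cons, List.foldl_nil]
      have hprev : PySem.List.pyGetD ((List.range (k+1)).map (pvRow kmap target)) (k : Int) [] = pvRow kmap target k := by
        rw [PySem.List.pyGetD_natCast, List.getD_eq_getElem?_getD]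
        simp
      rw [hprev, pvRowFold kmap target k (2 * pvCols kmap) (le_refl _)]
      rw [List.range_succ (n := k+1), List.map_append]
      simp [pvRow]

theorem pvT_rect (kmap : List (List Int)) (target : Int) (x j w : Nat) :
    pvT kmap target x (j + w) - pvT kmap target x j
      = ∑ y ∈ Finset.range w, pvInd kmap target x (j + y) := by
  simp [pvT, Finset.sum_range_add]

theorem pvRect (kmap : List (List Int)) (target : Int) (i j h w : Nat) :
    pvS kmap target (i+h) (j+w) - pvS kmap target i (j+w) - pvS kmap target (i+h) j + pvS kmap target i j
      = ∑ x ∈ Finset.range h, ∑ y ∈ Finset.range w, pvInd kmap target (i + x) (j + y) := by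
  have h1 : ∀ b, pvS kmap target (i+h) b - pvS kmap target i b = ∑ x ∈ Finset.range h, pvT kmap target (i+x) b := by
    intro b; simp [pvS, Finset.sum_range_add]
  have : pvS kmap target (i+h) (j+w) - pvS kmap target i (j+w) - pvS kmap target (i+h) j + pvS kmap target i j
      = (∑ x ∈ Finset.range h, pvT kmap target (i+x) (j+w)) - (∑ x ∈ Finset.range h, pvT kmap target (i+x) j) := by
    rw [← h1, ← h1]; ring
  rw [this, ← Finset.sum_sub_distrib]
  exact Finset.sum_congr rfl (fun x _ => pvT_rect kmap target (i+x) j w)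

theorem pvAllOnes (kmap : List (List Int)) (target : Int) (i j h w : Nat) :
    ((∑ x ∈ Finset.range h, ∑ y ∈ Finset.range w, pvInd kmap target (i + x) (j + y)) = (h : Int) * (w : Int))
      ↔ ∀ x < h, ∀ y < w, pvInd kmap target (i + x) (j + y) = 1 := by
  have hle1 : ∀ a b : Nat, pvInd kmap target a b ≤ 1 := by
    intro a b; unfold pvInd; split <;> norm_num
  have hinner_le : ∀ x : Nat, (∑ y ∈ Finset.range w, pvInd kmap target (i + x) (j + y)) ≤ (w : Int) := by
    intro x
    calc (∑ y ∈ Finset.range w, pvInd kmap target (i + x) (j + y))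
        ≤ ∑ y ∈ Finset.range w, (1 : Int) := Finset.sum_le_sum (fun y _ => hle1 _ _)
      _ = (w : Int) := by simp
  have houter : ((h : Int) * (w : Int)) = ∑ x ∈ Finset.range h, (w : Int) := by simp
  rw [houter, Finset.sum_eq_sum_iff_of_le (fun x _ => hinner_le x)]
  constructor
  · intro H x hx y hy
    have hx' : (∑ y ∈ Finset.range w, pvInd kmap target (i + x) (j + y)) = ∑ _y ∈ Finset.range w, (1:Int) := by
      rw [H x (Finset.mem_range.mpr hx)]; simp
    exact (Finset.sum_eq_sum_iff_of_le (fun y _ => hle1 (i+x) (j+y))).mp hx' y (Finset.mem_range.mpr hy)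
  · intro H x hx
    have : (∑ y ∈ Finset.range w, pvInd kmap target (i + x) (j + y)) = ∑ y ∈ Finset.range w, (1:Int) := by
      exact Finset.sum_congr rfl (fun y hy => H x (Finset.mem_range.mp hx) y (Finset.mem_range.mp hy))
    simpa using this


theorem pvCell (kmap : List (List Int)) (target : Int)
    (hrow : ∀ row ∈ kmap, pvCols kmap ≤ row.length) (x y : Nat)
    (hrn : 0 < kmap.length) (hcn : 0 < pvCols kmap) :
    ((((PySem.List.pyGet? kmap ((x % kmap.length : Nat) : Int)).bind
        (fun r => PySem.List.pyGet? r ((y % pvCols kmap : Nat) : Int))) == some target) = true)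
      ↔ pvInd kmap target x y = 1 := by
  have hu : x % kmap.length < kmap.length := Nat.mod_lt _ hrn
  have hv : y % pvCols kmap < pvCols kmap := Nat.mod_lt _ hcn
  have hvlen : y % pvCols kmap < (kmap[x % kmap.length]'hu).length :=
    lt_of_lt_of_le hv (hrow _ (List.getElem_mem hu))
  rw [PySem.List.pyGet?_natCast, List.getElem?_eq_getElem hu, Option.bind_some,
    PySem.List.pyGet?_natCast, List.getElem?_eq_getElem hvlen]
  unfold pvInd
  rw [List.getD_eq_getElem _ _ hu, List.getD_eq_getElem _ _ hvlen]
  constructor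
  · intro hb
    have : (kmap[x % kmap.length]'hu)[y % pvCols kmap]'hvlen = target := by
      simpa using hb
    simp [this]
  · intro hb
    by_cases he : (kmap[x % kmap.length]'hu)[y % pvCols kmap]'hvlen = target
    · simp [he]
    · simp [he] at hb

theorem pvCond (kmap : List (List Int)) (target : Int)
    (hrow : ∀ row ∈ kmap, pvCols kmap ≤ row.length)
    (iN jN hN wN : Nat) (hi : iN < kmap.length) (hj : jN < pvCols kmap)
    (hhb : iN + hN ≤ 2 * kmap.length) (hwb : jN + wN ≤ 2 * pvCols kmap) :
    is_valid_group kmap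
      ((PySem.List.pyRange 0 (hN : Int) 1).flatMap (fun di =>
        (PySem.List.pyRange 0 (wN : Int) 1).map (fun dj =>
          (PySem.Int.mod ((iN : Int) + di) (kmap.length : Int),
           PySem.Int.mod ((jN : Int) + dj) ((pvCols kmap : Nat) : Int))))) target
    = (PySem.List.pyGetD (PySem.List.pyGetD ((List.range (2 * kmap.length + 1)).map (pvRow kmap target)) ((iN : Int) + (hN : Int)) []) ((jN : Int) + (wN : Int)) 0
       - PySem.List.pyGetD (PySem.List.pyGetD ((List.range (2 * kmap.length + 1)).map (pvRow kmap target)) ((iN : Int)) []) ((jN : Int) + (wN : Int)) 0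
       - PySem.List.pyGetD (PySem.List.pyGetD ((List.range (2 * kmap.length + 1)).map (pvRow kmap target)) ((iN : Int) + (hN : Int)) []) ((jN : Int)) 0
       + PySem.List.pyGetD (PySem.List.pyGetD ((List.range (2 * kmap.length + 1)).map (pvRow kmap target)) ((iN : Int)) []) ((jN : Int)) 0
       == (hN : Int) * (wN : Int)) := by
  have hrn : 0 < kmap.length := by omega
  have hcn : 0 < pvCols kmap := by omega
  -- evaluate the prefix-table reads
  have hPS : ∀ (a b : Nat), a ≤ 2 * kmap.length → b ≤ 2 * pvCols kmap →
      PySem.List.pyGetD (PySem.List.pyGetD ((List.range (2 * kmap.length + 1)).map (pvRow kmap target)) ((a : Nat) : Int) []) ((b : Nat) : Int) 0 = pvS kmap target a b := by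
    intro a b ha hb
    simp only [PySem.List.pyGetD_natCast, List.getD_eq_getElem?_getD, List.getElem?_map]
    rw [List.getElem?_range (show a < 2 * kmap.length + 1 by omega)]
    simp only [Option.map_some, Option.getD_some, pvRow, List.getElem?_map]
    rw [List.getElem?_range (show b < 2 * pvCols kmap + 1 by omega)]
    simp only [Option.map_some, Option.getD_some]
  have e1 : ((iN : Int) + (hN : Int)) = (((iN + hN : Nat)) : Int) := by push_cast; ring
  have e2 : ((jN : Int) + (wN : Int)) = (((jN + wN : Nat)) : Int) := by push_cast; ring
  rw [e1, e2, hPS _ _ hhb hwb, hPS _ _ (by omega) hwb, hPS _ _ hhb (by omega), hPS _ _ (by omega) (by omega)]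
  -- both sides as decidable propositions
  have hrhs : (pvS kmap target (iN+hN) (jN+wN) - pvS kmap target iN (jN+wN) - pvS kmap target (iN+hN) jN + pvS kmap target iN jN
      == (hN : Int) * (wN : Int)) = true ↔ ∀ x < hN, ∀ y < wN, pvInd kmap target (iN + x) (jN + y) = 1 := by
    rw [beq_iff_eq, pvRect, pvAllOnes]
  have hlhs : is_valid_group kmap
      ((PySem.List.pyRange 0 (hN : Int) 1).flatMap (fun di =>
        (PySem.List.pyRange 0 (wN : Int) 1).map (fun dj =>
          (PySem.Int.mod ((iN : Int) + di) (kmap.length : Int),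
           PySem.Int.mod ((jN : Int) + dj) ((pvCols kmap : Nat) : Int))))) target = true
      ↔ ∀ x < hN, ∀ y < wN, pvInd kmap target (iN + x) (jN + y) = 1 := by
    unfold is_valid_group
    rw [List.all_eq_true]
    constructor
    · intro H x hx y hy
      have hmem : ((PySem.Int.mod ((iN : Int) + (x : Int)) (kmap.length : Int),
           PySem.Int.mod ((jN : Int) + (y : Int)) ((pvCols kmap : Nat) : Int))) ∈
          ((PySem.List.pyRange 0 (hN : Int) 1).flatMap (fun di =>
            (PySem.List.pyRange 0 (wN : Int) 1).map (fun dj =>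
              (PySem.Int.mod ((iN : Int) + di) (kmap.length : Int),
               PySem.Int.mod ((jN : Int) + dj) ((pvCols kmap : Nat) : Int))))) := by
        rw [List.mem_flatMap]
        refine ⟨(x : Int), ?_, ?_⟩
        · rw [PySem.List.mem_pyRange_one]; omega
        · rw [List.mem_map]
          exact ⟨(y : Int), by rw [PySem.List.mem_pyRange_one]; omega, rfl⟩
      have := H _ hmem
      have ei : ((iN : Int) + (x : Int)) = (((iN + x : Nat)) : Int) := by push_cast; ring
      have ej : ((jN : Int) + (y : Int)) = (((jN + y : Nat)) : Int) := by push_cast; ring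
      rw [ei, ej, PySem.Int.mod_natCast, PySem.Int.mod_natCast] at this
      exact (pvCell kmap target hrow (iN+x) (jN+y) hrn hcn).mp this
    · intro H c hc
      rw [List.mem_flatMap] at hc
      obtain ⟨di, hdi, hc⟩ := hc
      rw [List.mem_map] at hc
      obtain ⟨dj, hdj, rfl⟩ := hc
      rw [PySem.List.mem_pyRange_one] at hdi hdj
      obtain ⟨x, rfl⟩ : ∃ x : Nat, di = (x : Int) := ⟨di.toNat, by omega⟩
      obtain ⟨y, rfl⟩ : ∃ y : Nat, dj = (y : Int) := ⟨dj.toNat, by omega⟩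
      have ei : ((iN : Int) + (x : Int)) = (((iN + x : Nat)) : Int) := by push_cast; ring
      have ej : ((jN : Int) + (y : Int)) = (((jN + y : Nat)) : Int) := by push_cast; ring
      rw [ei, ej, PySem.Int.mod_natCast, PySem.Int.mod_natCast]
      exact (pvCell kmap target hrow (iN+x) (jN+y) hrn hcn).mpr (H x (by omega) y (by omega))
  rw [Bool.eq_iff_iff, hrhs, hlhs]

-- ===== VERDICT (by name: the statement is the Claim_ definition above) =====
theorem get_all_groups_spec : Claim_equal_get_all_groups := by
  intro kmap target _ hpre
  obtain ⟨hne, hrow'⟩ := hpre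
  have hrow : ∀ row ∈ kmap, pvCols kmap ≤ row.length := hrow'
  have hrn : 0 < kmap.length := List.length_pos_of_ne_nil hne
  unfold Spec_get_all_groups get_all_groups get_all_groups_alt
  have c1 : (2 * (kmap.length : Int)) = ((2 * kmap.length : Nat) : Int) := by push_cast; ring
  have c2 : (2 * (pvCols kmap : Int)) = ((2 * pvCols kmap : Nat) : Int) := by push_cast; ring
  have c3 : (((2 * pvCols kmap : Nat) : Int) + 1).toNat = 2 * pvCols kmap + 1 := by omega
  simp only [pvGetD_zero_len, c1, c2, c3]
  rw [pvPFold kmap target (2 * kmap.length) (le_refl _)]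
  refine PySem.List.foldl_congr_mem _ _ _ _ ?_
  intro acc h hmem
  have hh : ∃ hN : Nat, h = (hN : Int) ∧ 1 ≤ hN ∧ hN ≤ kmap.length + 1 := by
    simp only [List.mem_cons, List.not_mem_nil, or_false] at hmem
    rcases hmem with rfl | rfl | rfl
    · exact ⟨1, by norm_num⟩
    · exact ⟨2, by norm_num; omega⟩
    · exact ⟨kmap.length, rfl, by omega⟩
  obtain ⟨hN, rfl, hh1, hh2⟩ := hh
  refine PySem.List.foldl_congr_mem _ _ _ _ ?_
  intro acc2 w hwmem
  have hw : ∃ wN : Nat, w = (wN : Int) ∧ (wN = 1 ∨ wN = 2 ∨ wN = pvCols kmap) := by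
    simp only [List.mem_cons, List.not_mem_nil, or_false] at hwmem
    rcases hwmem with rfl | rfl | rfl
    · exact ⟨1, by norm_num⟩
    · exact ⟨2, by norm_num⟩
    · exact ⟨pvCols kmap, rfl, by omega⟩
  obtain ⟨wN, rfl, hwcase⟩ := hw
  by_cases hw0 : wN = 0
  · subst hw0
    simp
  by_cases hcn0 : pvCols kmap = 0
  · have hje : PySem.List.pyRange 0 ((pvCols kmap : Nat) : Int) 1 = [] := by
      rw [hcn0]; exact PySem.List.pyRange_one_eq_nil (by norm_num)
    simp only [hje, List.foldl_nil]
    split <;> split <;> simp_all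
  have hcn : 1 ≤ pvCols kmap := by omega
  have hwn1 : 1 ≤ wN := by omega
  have hwn2 : wN ≤ pvCols kmap + 1 := by omega
  have hgA : (((hN : Int) * (wN : Int)) == 0) = false := by
    simp only [beq_eq_false_iff_ne, ne_eq]
    intro hc
    rcases mul_eq_zero.mp hc with hc | hc <;> omega
  have hgB : (((wN : Int)) == 0) = false := by
    simp only [beq_eq_false_iff_ne, ne_eq]
    omega
  rw [hgA, hgB]
  simp only [Bool.false_eq_true, if_false]
  simp only [PySem.List.pyRange_zero_nat kmap.length, PySem.List.pyRange_zero_nat (pvCols kmap),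
    List.foldl_map]
  refine PySem.List.foldl_congr_mem _ _ _ _ ?_
  intro acc3 iN hiN
  rw [List.mem_range] at hiN
  refine PySem.List.foldl_congr_mem _ _ _ _ ?_
  intro acc4 jN hjN
  rw [List.mem_range] at hjN
  have hcells :
      (PySem.List.pyRange 0 (hN : Int) 1).foldl (fun cells di =>
        (PySem.List.pyRange 0 (wN : Int) 1).foldl (fun cells dj =>
          cells ++ [(PySem.Int.mod ((iN : Int) + di) (kmap.length : Int),
            PySem.Int.mod ((jN : Int) + dj) ((pvCols kmap : Nat) : Int))]) cells) []
      = (PySem.List.pyRange 0 (hN : Int) 1).flatMap (fun di =>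
          (PySem.List.pyRange 0 (wN : Int) 1).map (fun dj =>
            (PySem.Int.mod ((iN : Int) + di) (kmap.length : Int),
             PySem.Int.mod ((jN : Int) + dj) ((pvCols kmap : Nat) : Int)))) := by
    simp only [PySem.List.foldl_append_singleton_eq_map, PySem.List.foldl_append_eq_flatMap,
      List.nil_append]
  rw [hcells, pvCond kmap target hrow iN jN hN wN hiN hjN (by omega) (by omega)]
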